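-- pv_equiv track=rewrite | github.com/Samuel-K95/A2sv_problems | 06-Jun-2024/Separate Black and white balls 164610.py | minimumSteps
-- ===== SOURCE A (Python) =====
-- def minimumSteps(s: str) -> int:
--     placeholder = 0
--     s = [i for i in s]
--     ans = 0
--     for seeker in range(len(s)):
--         if s[seeker] == '0':
--             ans += (seeker - placeholder)
--             s[seeker], s[placeholder] = s[placeholder], s[seeker]
--             placeholder += 1
--
--     return ans
-- ===== SOURCE B (Python) =====
-- def minimumSteps(s: str) -> int:
--     zeros = [i for i, c in enumerate(s) if c == '0']
--     z = len(zeros)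
--     return sum(zeros) - z * (z - 1) // 2
-- ===== Notes on version B (the rewrite author's own statement) =====
-- stated objective: alternative
-- what changed: Replaces A's stateful in-place two-pointer swap simulation with a stateless closed form: collect the indices of the '0' characters and return their sum minus z*(z-1)//2, the displacement of each zero from its final rank.
import Mathlib
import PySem

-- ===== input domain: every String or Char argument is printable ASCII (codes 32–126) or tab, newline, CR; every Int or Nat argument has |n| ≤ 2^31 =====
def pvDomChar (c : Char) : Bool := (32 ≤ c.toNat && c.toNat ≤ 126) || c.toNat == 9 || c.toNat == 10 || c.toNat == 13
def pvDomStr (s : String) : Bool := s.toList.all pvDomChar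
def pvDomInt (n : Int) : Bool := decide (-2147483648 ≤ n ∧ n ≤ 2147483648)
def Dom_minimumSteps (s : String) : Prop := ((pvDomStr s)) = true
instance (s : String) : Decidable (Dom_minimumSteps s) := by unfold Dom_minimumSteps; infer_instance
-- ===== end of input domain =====

-- B replaces A's stateful in-place two-pointer swap simulation with a stateless
-- closed form over the list of zero indices (objective: alternative; same O(n) cost).

-- ===== PORT A =====
-- loop body of A: state is (the mutable char list, placeholder, ans); every
-- s[seeker]/s[placeholder] index is provably in range in A, so getD is exact here
def minimumStepsStep (st : List Char × Nat × Int) (seeker : Nat) : List Char × Nat × Int :=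
  let sl := st.1
  let placeholder := st.2.1
  let ans := st.2.2
  if sl.getD seeker ' ' = '0' then
    ((sl.set seeker (sl.getD placeholder ' ')).set placeholder (sl.getD seeker ' '),
     placeholder + 1, ans + ((seeker : Int) - (placeholder : Int)))
  else st

def minimumSteps (s : String) : Int :=
  let l := s.toList
  ((List.range l.length).foldl minimumStepsStep (l, 0, 0)).2.2

-- ===== PORT B =====
-- zeros = [i for i, c in enumerate(s) if c == '0']; sum(zeros) - z*(z-1)//2
def minimumSteps_alt (s : String) : Int :=
  let zeros := ((PySem.List.enumerate s.toList 0).filter (fun p => p.2 == '0')).map (fun p => p.1)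
  let z : Int := zeros.length
  zeros.sum - PySem.Int.floordiv (z * (z - 1)) 2

-- ===== PRECONDITION & SPEC =====
def Spec_minimumSteps (s : String) (out : Int) : Prop := out = minimumSteps_alt s
instance (s : String) (out : Int) : Decidable (Spec_minimumSteps s out) := by unfold Spec_minimumSteps; infer_instance

-- ===== CLAIM (what is proved, stated in full; the proofs are below) =====
def Claim_equal_minimumSteps : Prop := ∀ (s : String), Dom_minimumSteps s → Spec_minimumSteps s (minimumSteps s)

-- ===== LEMMAS AND PROOFS =====

-- proof-only intermediate: the counter fold 'ans += others at each zero, others += 1 else'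
def pvCounterStep (st : Int × Int) (c : Char) : Int × Int :=
  if c = '0' then (st.1 + st.2, st.2) else (st.1, st.2 + 1)

-- proof-only: G z0 n = z0 + (z0+1) + ... + (z0+n-1)
def pvG (z0 : Nat) : Nat → Int
  | 0 => 0
  | n + 1 => (z0 : Int) + pvG (z0 + 1) n

-- A's fold equals the counter fold (loop invariant on A's mutable list)
theorem keyA (l0 : List Char) : ∀ (m k : Nat) (lc : List Char) (p : Nat) (a : Int),
    p ≤ k → k + m = l0.length → lc.drop k = l0.drop k →
    ((List.range' k m).foldl minimumStepsStep (lc, p, a)).2.2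
      = ((l0.drop k).foldl pvCounterStep (a, (k : Int) - (p : Int))).1 := by
  intro m
  induction m with
  | zero =>
    intro k lc p a hp hk _
    have hdrop : l0.drop k = [] := by
      have : k = l0.length := by omega
      simp [this]
    simp [hdrop]
  | succ m ih =>
    intro k lc p a hp hk hagree
    have hklt : k < l0.length := by omega
    have hget? : lc[k]? = l0[k]? := by
      have h0 : (lc.drop k)[0]? = (l0.drop k)[0]? := by rw [hagree]
      simpa using h0
    have hgetD : lc.getD k ' ' = l0[k] := by
      simp [List.getD, hget?, hklt]
    have hcons : l0.drop k = l0[k] :: l0.drop (k + 1) := (List.getElem_cons_drop hklt).symm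
    have htail : lc.drop (k + 1) = l0.drop (k + 1) := by
      have := congrArg List.tail hagree
      simpa [List.tail_drop] using this
    rw [List.range'_succ, List.foldl_cons, hcons, List.foldl_cons]
    by_cases h0 : l0[k] = '0'
    · have hA : minimumStepsStep (lc, p, a) k
          = ((lc.set k (lc.getD p ' ')).set p (lc.getD k ' '),
             p + 1, a + ((k : Int) - (p : Int))) := by
        simp only [minimumStepsStep, hgetD]
        simp [h0]
      have hdropset :
          ((lc.set k (lc.getD p ' ')).set p (lc.getD k ' ')).drop (k + 1) = l0.drop (k + 1) := by
        rw [List.drop_set, List.drop_set]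
        have hpk : p < k + 1 := by omega
        have hkk : k < k + 1 := by omega
        simp [hpk, hkk, htail]
      have := ih (k + 1) ((lc.set k (lc.getD p ' ')).set p (lc.getD k ' '))
          (p + 1) (a + ((k : Int) - (p : Int))) (by omega) (by omega) hdropset
      have hcast : ((k + 1 : Nat) : Int) - ((p + 1 : Nat) : Int) = (k : Int) - (p : Int) := by
        push_cast; ring
      rw [hA, this, hcast]
      simp [pvCounterStep, h0]
    · have hA : minimumStepsStep (lc, p, a) k = (lc, p, a) := by
        simp only [minimumStepsStep, hgetD]
        simp [h0]
      have := ih (k + 1) lc p a (by omega) (by omega) htail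
      have hcast : ((k + 1 : Nat) : Int) - (p : Int) = ((k : Int) - (p : Int)) + 1 := by
        push_cast; ring
      rw [hA, this, hcast]
      simp [pvCounterStep, h0]

-- the counter fold equals (sum of zero indices) - (z0 + (z0+1) + ... ), offset form
theorem keyB : ∀ (l : List Char) (a : Int) (off z0 : Nat),
    (l.foldl pvCounterStep (a, (off : Int) - (z0 : Int))).1
      = a + (((PySem.List.enumerate l (off : Int)).filter (fun p => p.2 == '0')).map
              (fun p => p.1)).sum
          - pvG z0 (l.count '0') := by
  intro l
  induction l with
  | nil => intro a off z0; simp [pvG]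
  | cons c t ih =>
    intro a off z0
    rw [PySem.List.enumerate_cons, List.foldl_cons]
    by_cases h0 : c = '0'
    · have hstep : pvCounterStep (a, (off : Int) - (z0 : Int)) c
          = (a + ((off : Int) - (z0 : Int)), (off : Int) - (z0 : Int)) := by
        simp [pvCounterStep, h0]
      rw [hstep]
      have ih' := ih (a + ((off : Int) - (z0 : Int))) (off + 1) (z0 + 1)
      have hsh : ((off + 1 : Nat) : Int) - ((z0 + 1 : Nat) : Int) = (off : Int) - (z0 : Int) := by
        push_cast; ring
      have hcast : ((off + 1 : Nat) : Int) = (off : Int) + 1 := by push_cast; ring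
      rw [hsh, hcast] at ih'
      rw [ih']
      have hc : (c :: t).count '0' = t.count '0' + 1 := by
        simp [h0]
      have hG : pvG z0 (t.count '0' + 1) = (z0 : Int) + pvG (z0 + 1) (t.count '0') := rfl
      rw [hc, hG]
      simp [h0]
      ring
    · have hstep : pvCounterStep (a, (off : Int) - (z0 : Int)) c
          = (a, (off : Int) - (z0 : Int) + 1) := by
        simp [pvCounterStep, h0]
      rw [hstep]
      have hsh : (off : Int) - (z0 : Int) + 1 = ((off + 1 : Nat) : Int) - (z0 : Int) := by
        push_cast; ring
      rw [hsh, ih a (off + 1) z0]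
      have hc : (c :: t).count '0' = t.count '0' := by
        simp [h0]
      rw [hc]
      simp [h0]

-- Gauss: 2 * pvG z0 n = n * (2*z0 + n - 1)
theorem pvG_gauss : ∀ (n z0 : Nat), 2 * pvG z0 n = (n : Int) * (2 * (z0 : Int) + (n : Int) - 1) := by
  intro n
  induction n with
  | zero => intro z0; simp [pvG]
  | succ n ih =>
    intro z0
    rw [pvG, mul_add, ih (z0 + 1)]
    push_cast
    ring

theorem pvG_zero_eq_floordiv (n : Nat) :
    pvG 0 n = PySem.Int.floordiv ((n : Int) * ((n : Int) - 1)) 2 := by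
  have h2 : (0 : Int) < 2 := by norm_num
  rw [PySem.Int.floordiv_eq_ediv_of_pos h2]
  have hg := pvG_gauss n 0
  have : (n : Int) * ((n : Int) - 1) = 2 * pvG 0 n := by rw [hg]; push_cast; ring
  rw [this, Int.mul_ediv_cancel_left _ (by norm_num)]

-- the zeros list has length = count of '0'
theorem zeros_length (l : List Char) (off : Int) :
    (((PySem.List.enumerate l off).filter (fun p => p.2 == '0')).map (fun p => p.1)).length
      = l.count '0' := by
  induction l generalizing off with
  | nil => simp
  | cons c t ih =>
    rw [PySem.List.enumerate_cons]
    by_cases h0 : c = '0'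
    · simp [h0, ih]
    · simp [h0, ih]

-- ===== VERDICT (by name: the statement is the Claim_ definition above) =====
theorem minimumSteps_spec : Claim_equal_minimumSteps := by
  intro s _
  unfold Spec_minimumSteps minimumSteps minimumSteps_alt
  have hA := keyA s.toList s.toList.length 0 s.toList 0 0 (by omega) (by omega) rfl
  have hB := keyB s.toList 0 0 0
  simp only [List.range_eq_range'] at *
  simp only [List.drop_zero, Nat.cast_zero, sub_zero] at hA hB
  rw [hA, hB, zeros_length, pvG_zero_eq_floordiv]
  ring_nf
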